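-- pv_equiv track=rewrite | github.com/Megamind33-tech/Radio-monitor- | scripts/normalize_fingerprint_sources.py | fix_url
-- ===== SOURCE A (Python) =====
-- def fix_url(u):
--     u=(u or "").strip()
--     changed=True
--     while changed:
--         old=u
--         u=u.replace("https://https://","https://")
--         u=u.replace("http://https://","https://")
--         u=u.replace("https://http://","http://")
--         u=u.replace("http://http://","http://")
--         changed=(old!=u)
--     return u
-- ===== SOURCE B (Python) =====
-- def fix_url(u):
--     s = (u or "").strip()
--     out = []
--     i = 0
--     n = len(s)
--     while i < n:
--         if s.startswith("https://", i):
--             tok, j = "https://", i + 8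
--         elif s.startswith("http://", i):
--             tok, j = "http://", i + 7
--         else:
--             out.append(s[i])
--             i += 1
--             continue
--         if s.startswith("https://", j) or s.startswith("http://", j):
--             i = j          # drop this scheme token: a later token of the run wins
--         else:
--             out.append(tok)
--             i = j
--     return "".join(out)
-- ===== Notes on version B (the rewrite author's own statement) =====
-- stated objective: alternative
-- what changed: A repeatedly runs four str.replace passes until a fixpoint is reached; B strips the input once and makes a single left-to-right scan that, for each maximal run of adjacent http:///https:// scheme tokens, emits only the run's last token.
import Mathlib
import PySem

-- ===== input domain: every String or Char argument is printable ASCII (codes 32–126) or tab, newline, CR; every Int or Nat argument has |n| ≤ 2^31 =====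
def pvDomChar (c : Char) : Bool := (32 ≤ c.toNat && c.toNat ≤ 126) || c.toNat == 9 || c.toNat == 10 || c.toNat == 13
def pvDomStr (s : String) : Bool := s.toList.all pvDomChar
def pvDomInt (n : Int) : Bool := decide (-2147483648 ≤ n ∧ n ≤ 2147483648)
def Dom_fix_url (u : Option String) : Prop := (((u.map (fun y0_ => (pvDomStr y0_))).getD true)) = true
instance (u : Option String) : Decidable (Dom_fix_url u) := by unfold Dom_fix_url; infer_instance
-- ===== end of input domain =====

-- B replaces A's replace-until-fixpoint loop by ONE left-to-right scan that keeps, for each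
-- maximal run of http:// / https:// tokens, only its last token (objective: alternative).

-- shared token constants ("http://" and "https://" as char lists)
def tokA : List Char := ['h', 't', 't', 'p', ':', '/', '/']
def tokB : List Char := ['h', 't', 't', 'p', 's', ':', '/', '/']

-- ===== PORT A =====
-- clean structural form of PySem.Chars.replace for a nonempty pattern 'h'::otl
-- (used to prove the length facts fixList's termination needs)
def repC (otl new : List Char) : List Char → List Char
  | [] => []
  | c :: t =>
    if ('h' :: otl).isPrefixOf (c :: t) then new ++ repC otl new (t.drop otl.length)
    else c :: repC otl new t
termination_by s => s.length
decreasing_by all_goals (simp; try omega)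

theorem replace_go_eq (otl new : List Char) : ∀ (fuel : Nat) (l acc : List Char),
    l.length ≤ fuel →
    PySem.Chars.replace.go ('h' :: otl) new fuel l acc = acc.reverse ++ repC otl new l := by
  intro fuel
  induction fuel with
  | zero =>
    intro l acc h
    have : l = [] := List.length_eq_zero_iff.mp (Nat.le_zero.mp h)
    subst this
    simp [PySem.Chars.replace.go, repC]
  | succ n ih =>
    intro l acc h
    match l with
    | [] => simp [PySem.Chars.replace.go, repC]
    | c :: t =>
      rw [PySem.Chars.replace.go]
      by_cases hp : ('h' :: otl).isPrefixOf (c :: t)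
      · rw [if_pos hp]
        rw [ih _ _ (by simp at h ⊢; omega)]
        rw [repC, if_pos hp]
        simp
      · rw [if_neg hp]
        rw [ih _ _ (by simp at h ⊢; omega)]
        rw [repC, if_neg hp]
        simp

theorem replace_eq (otl new s : List Char) :
    PySem.Chars.replace s ('h' :: otl) new = repC otl new s := by
  rw [PySem.Chars.replace]
  simp [replace_go_eq otl new s.length s [] (le_refl _)]

theorem repC_length_le (otl new : List Char) (hnew : new.length ≤ otl.length + 1) :
    ∀ l : List Char, (repC otl new l).length ≤ l.length := by
  intro l
  induction l using repC.induct (otl := otl) with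
  | case1 => simp [repC]
  | case2 c t hp ih =>
    have hl := (List.isPrefixOf_iff_prefix.mp hp).length_le
    rw [repC, if_pos hp]
    simp at ih hl ⊢
    omega
  | case3 c t hp ih =>
    rw [repC, if_neg hp]
    simp
    omega

theorem repC_eq_of_length (otl new : List Char) (hnew : new.length < otl.length + 1) :
    ∀ l : List Char, (repC otl new l).length = l.length → repC otl new l = l := by
  intro l
  induction l using repC.induct (otl := otl) with
  | case1 => simp [repC]
  | case2 c t hp ih =>
    intro hlen
    exfalso
    have hl := (List.isPrefixOf_iff_prefix.mp hp).length_le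
    have hle := repC_length_le otl new (by omega) (List.drop otl.length t)
    rw [repC, if_pos hp] at hlen
    simp at hl hle hlen
    omega
  | case3 c t hp ih =>
    intro hlen
    rw [repC, if_neg hp] at hlen ⊢
    simp at hlen
    rw [ih hlen]

-- the body of one iteration of A's while-loop: the four replacements, in A's order
def stepA (s : List Char) : List Char :=
  let s1 := PySem.Chars.replace s  ['h','t','t','p','s',':','/','/','h','t','t','p','s',':','/','/'] tokB
  let s2 := PySem.Chars.replace s1 ['h','t','t','p',':','/','/','h','t','t','p','s',':','/','/'] tokB
  let s3 := PySem.Chars.replace s2 ['h','t','t','p','s',':','/','/','h','t','t','p',':','/','/'] tokA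
  PySem.Chars.replace s3 ['h','t','t','p',':','/','/','h','t','t','p',':','/','/'] tokA

theorem stepA_eq_repC (s : List Char) :
    stepA s = repC ['t','t','p',':','/','/','h','t','t','p',':','/','/'] tokA
      (repC ['t','t','p','s',':','/','/','h','t','t','p',':','/','/'] tokA
        (repC ['t','t','p',':','/','/','h','t','t','p','s',':','/','/'] tokB
          (repC ['t','t','p','s',':','/','/','h','t','t','p','s',':','/','/'] tokB s))) := by
  unfold stepA
  rw [replace_eq, replace_eq, replace_eq, replace_eq]

theorem stepA_lt (s : List Char) (h : stepA s ≠ s) : (stepA s).length < s.length := by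
  rw [stepA_eq_repC] at h ⊢
  set l1 := repC ['t','t','p','s',':','/','/','h','t','t','p','s',':','/','/'] tokB s with hl1
  set l2 := repC ['t','t','p',':','/','/','h','t','t','p','s',':','/','/'] tokB l1 with hl2
  set l3 := repC ['t','t','p','s',':','/','/','h','t','t','p',':','/','/'] tokA l2 with hl3
  set l4 := repC ['t','t','p',':','/','/','h','t','t','p',':','/','/'] tokA l3 with hl4
  have h1 : l1.length ≤ s.length := repC_length_le _ _ (by simp [tokB]) s
  have h2 : l2.length ≤ l1.length := repC_length_le _ _ (by simp [tokB]) l1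
  have h3 : l3.length ≤ l2.length := repC_length_le _ _ (by simp [tokA]) l2
  have h4 : l4.length ≤ l3.length := repC_length_le _ _ (by simp [tokA]) l3
  by_contra hc
  have e4 : l4.length = l3.length := by omega
  have e3 : l3.length = l2.length := by omega
  have e2 : l2.length = l1.length := by omega
  have e1 : l1.length = s.length := by omega
  have q1 := repC_eq_of_length _ _ (by simp [tokB]) s e1
  rw [← hl1] at q1
  have q2 := repC_eq_of_length _ _ (by simp [tokB]) l1 e2
  rw [← hl2] at q2
  have q3 := repC_eq_of_length _ _ (by simp [tokA]) l2 e3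
  rw [← hl3] at q3
  have q4 := repC_eq_of_length _ _ (by simp [tokA]) l3 e4
  rw [← hl4] at q4
  exact h (by rw [q4, q3, q2, q1])

-- A's while-loop: repeat stepA until nothing changed
def fixList (s : List Char) : List Char :=
  let s' := stepA s
  if h : s' = s then s else fixList s'
termination_by s.length
decreasing_by exact stepA_lt s h

def fix_url (u : Option String) : String :=
  String.ofList (fixList (PySem.Chars.strip (u.getD "").toList))

-- ===== PORT B =====
-- single pass: at each position, consume a scheme token; keep it only when the text
-- after it does not start with another scheme token; otherwise copy one char
def scan : List Char → List Char
  | [] => []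
  | c :: t =>
    if tokB.isPrefixOf (c :: t) then
      if tokB.isPrefixOf ((c :: t).drop 8) || tokA.isPrefixOf ((c :: t).drop 8) then
        scan ((c :: t).drop 8)
      else tokB ++ scan ((c :: t).drop 8)
    else if tokA.isPrefixOf (c :: t) then
      if tokB.isPrefixOf ((c :: t).drop 7) || tokA.isPrefixOf ((c :: t).drop 7) then
        scan ((c :: t).drop 7)
      else tokA ++ scan ((c :: t).drop 7)
    else c :: scan t
termination_by s => s.length
decreasing_by all_goals (simp; try omega)

def fix_url_alt (u : Option String) : String :=
  String.ofList (scan (PySem.Chars.strip (u.getD "").toList))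

-- ===== PRECONDITION & SPEC =====
def Spec_fix_url (u : Option String) (out : String) : Prop := out = fix_url_alt u
instance (u : Option String) (out : String) : Decidable (Spec_fix_url u out) := by unfold Spec_fix_url; infer_instance

-- ===== CLAIM (what is proved, stated in full; the proofs are below) =====
def Claim_equal_fix_url : Prop := ∀ (u : Option String), Dom_fix_url u → Spec_fix_url u (fix_url u)

-- ===== LEMMAS AND PROOFS =====

theorem repC_lt_of_infix (otl new : List Char) (hnew : new.length < otl.length + 1)
    (l : List Char) (h : ('h' :: otl) <:+: l) : (repC otl new l).length < l.length := by
  induction l using repC.induct (otl := otl) with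
  | case1 => simp at h
  | case2 c t hp ih =>
    have hl := (List.isPrefixOf_iff_prefix.mp hp).length_le
    have hle := repC_length_le otl new (by omega) (List.drop otl.length t)
    rw [repC, if_pos hp]
    simp at hl hle ⊢
    omega
  | case3 c t hp ih =>
    rcases List.infix_cons_iff.mp h with hpre | hinf
    · exact absurd (List.isPrefixOf_iff_prefix.mpr hpre) hp
    · rw [repC, if_neg hp]
      simpa using ih hinf

-- token occurrences never start inside a token: every char of a token after its
-- leading 'h' is ≠ 'h', so a replace pattern (which starts with 'h') cannot bite into it
theorem repC_copy (otl new : List Char) :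
    ∀ pre t : List Char, (∀ c ∈ pre, c ≠ 'h') →
      repC otl new (pre ++ t) = pre ++ repC otl new t := by
  intro pre
  induction pre with
  | nil => intro t _; simp
  | cons c pre' ih =>
    intro t hpre
    have hc : c ≠ 'h' := hpre c (by simp)
    have hneg : ¬ ('h' :: otl).isPrefixOf (c :: (pre' ++ t)) = true := fun hp =>
      hc (List.cons_prefix_cons.mp (List.isPrefixOf_iff_prefix.mp hp)).1.symm
    rw [List.cons_append, repC, if_neg hneg, ih t (fun d hd => hpre d (by simp [hd]))]
    simp

theorem repC_prefix_iff (otl ntl : List Char) :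
    ∀ pre : List Char, (∀ c ∈ pre, c ≠ 'h') →
      ∀ t, (pre <+: repC otl ('h' :: ntl) t ↔ pre <+: t) := by
  intro pre
  induction pre with
  | nil => intro _ t; simp
  | cons c pre' ih =>
    intro hpre t
    have hc : c ≠ 'h' := hpre c (by simp)
    have hpre' : ∀ d ∈ pre', d ≠ 'h' := fun d hd => hpre d (by simp [hd])
    match t with
    | [] => simp [repC]
    | d :: t' =>
      by_cases hp : ('h' :: otl).isPrefixOf (d :: t')
      · have hd : d = 'h' :=
          (List.cons_prefix_cons.mp (List.isPrefixOf_iff_prefix.mp hp)).1.symm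
        rw [repC, if_pos hp]
        constructor
        · intro hcp
          exact absurd (List.cons_prefix_cons.mp (by simpa using hcp)).1 hc
        · intro hcp
          exact absurd ((List.cons_prefix_cons.mp hcp).1.trans hd) hc
      · rw [repC, if_neg hp]
        rw [List.cons_prefix_cons, List.cons_prefix_cons, ih hpre' t']

theorem nonh_tailA : ∀ c ∈ (['t','t','p',':','/','/'] : List Char), c ≠ 'h' := by
  intro c hc; fin_cases hc <;> simp
theorem nonh_tailB : ∀ c ∈ (['t','t','p','s',':','/','/'] : List Char), c ≠ 'h' := by
  intro c hc; fin_cases hc <;> simp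

theorem tok_decomp (xtl Y t : List Char)
    (hp : ('h' :: (xtl ++ Y)).isPrefixOf t = true) :
    ∃ t₂, t = ('h' :: xtl) ++ Y ++ t₂ := by
  obtain ⟨t₂, ht⟩ := List.isPrefixOf_iff_prefix.mp hp
  exact ⟨t₂, by rw [← ht]; simp⟩

theorem repC_pat (xtl Y t₂ : List Char) :
    repC (xtl ++ Y) Y (('h' :: xtl) ++ Y ++ t₂) = Y ++ repC (xtl ++ Y) Y t₂ := by
  have hsh : ('h' :: xtl) ++ Y ++ t₂ = 'h' :: ((xtl ++ Y) ++ t₂) := by simp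
  rw [hsh, repC, if_pos, List.drop_left]
  exact List.isPrefixOf_iff_prefix.mpr ⟨t₂, by simp⟩

theorem isTok_append_tokA (w : List Char) :
    (tokB.isPrefixOf (tokA ++ w) || tokA.isPrefixOf (tokA ++ w)) = true := by
  simp [tokA, tokB, List.isPrefixOf]

theorem isTok_append_tokB (w : List Char) :
    (tokB.isPrefixOf (tokB ++ w) || tokA.isPrefixOf (tokB ++ w)) = true := by
  simp [tokA, tokB, List.isPrefixOf]

theorem isTok_repC (xtl Y : List Char)
    (hXtok : ('h' :: xtl) = tokA ∨ ('h' :: xtl) = tokB) (hY : Y = tokA ∨ Y = tokB) :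
    ∀ t, (tokB.isPrefixOf (repC (xtl ++ Y) Y t) || tokA.isPrefixOf (repC (xtl ++ Y) Y t))
        = (tokB.isPrefixOf t || tokA.isPrefixOf t) := by
  intro t
  by_cases hp : ('h' :: (xtl ++ Y)).isPrefixOf t
  · obtain ⟨t₂, rfl⟩ := tok_decomp xtl Y t hp
    rw [repC_pat]
    have hL : (tokB.isPrefixOf (Y ++ repC (xtl ++ Y) Y t₂)
        || tokA.isPrefixOf (Y ++ repC (xtl ++ Y) Y t₂)) = true := by
      rcases hY with h | h <;> rw [h]
      · exact isTok_append_tokA _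
      · exact isTok_append_tokB _
    have hR : (tokB.isPrefixOf (('h' :: xtl) ++ Y ++ t₂)
        || tokA.isPrefixOf (('h' :: xtl) ++ Y ++ t₂)) = true := by
      rcases hXtok with h | h <;> rw [List.append_assoc, h]
      · exact isTok_append_tokA _
      · exact isTok_append_tokB _
    rw [hL, hR]
  · match t with
    | [] => simp [repC]
    | c :: t' =>
      rw [repC, if_neg hp]
      by_cases hc : c = 'h'
      · subst hc
        obtain ⟨ntl, hn⟩ : ∃ ntl, Y = 'h' :: ntl := by
          rcases hY with h | h <;> exact ⟨_, by rw [h]; rfl⟩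
        have hA := repC_prefix_iff (xtl ++ Y) ntl ['t','t','p',':','/','/'] nonh_tailA t'
        have hB := repC_prefix_iff (xtl ++ Y) ntl
          ['t','t','p','s',':','/','/'] nonh_tailB t'
        rw [← hn] at hA hB
        have eA : (['t','t','p',':','/','/'] : List Char).isPrefixOf (repC (xtl ++ Y) Y t')
            = (['t','t','p',':','/','/'] : List Char).isPrefixOf t' := by
          rw [Bool.eq_iff_iff]
          simpa [List.isPrefixOf_iff_prefix] using hA
        have eB : (['t','t','p','s',':','/','/'] : List Char).isPrefixOf (repC (xtl ++ Y) Y t')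
            = (['t','t','p','s',':','/','/'] : List Char).isPrefixOf t' := by
          rw [Bool.eq_iff_iff]
          simpa [List.isPrefixOf_iff_prefix] using hB
        simp only [tokA, tokB, List.isPrefixOf, beq_self_eq_true, Bool.true_and, eA, eB]
      · simp only [tokA, tokB, List.isPrefixOf,
          show ('h' == c) = false from beq_eq_false_iff_ne.mpr (Ne.symm hc),
          Bool.false_and, Bool.or_self]

theorem scan_tokB (t : List Char) :
    scan (tokB ++ t) = if tokB.isPrefixOf t || tokA.isPrefixOf t then scan t
      else tokB ++ scan t := by
  rw [show tokB ++ t = 'h' :: (['t','t','p','s',':','/','/'] ++ t) from rfl, scan]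
  rw [if_pos (by simp [tokB, List.isPrefixOf])]
  simp only [show ('h' :: (['t','t','p','s',':','/','/'] ++ t)).drop 8 = t from by simp]

theorem scan_tokA (t : List Char) :
    scan (tokA ++ t) = if tokB.isPrefixOf t || tokA.isPrefixOf t then scan t
      else tokA ++ scan t := by
  rw [show tokA ++ t = 'h' :: (['t','t','p',':','/','/'] ++ t) from rfl, scan]
  rw [if_neg (by simp [tokB, List.isPrefixOf]),
    if_pos (by simp [tokA, List.isPrefixOf])]
  simp only [show ('h' :: (['t','t','p',':','/','/'] ++ t)).drop 7 = t from by simp]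

theorem scan_cons (c : Char) (t : List Char)
    (hB : tokB.isPrefixOf (c :: t) = false) (hA : tokA.isPrefixOf (c :: t) = false) :
    scan (c :: t) = c :: scan t := by
  rw [scan, if_neg (by simp [hB]), if_neg (by simp [hA])]

-- one replace pass does not change the scan result
theorem scan_repC (xtl Y : List Char)
    (hXtok : ('h' :: xtl) = tokA ∨ ('h' :: xtl) = tokB) (hY : Y = tokA ∨ Y = tokB) :
    ∀ (n : Nat) (t : List Char), t.length ≤ n →
      scan (repC (xtl ++ Y) Y t) = scan t := by
  intro n
  induction n with
  | zero =>
    intro t ht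
    rw [List.length_eq_zero_iff.mp (Nat.le_zero.mp ht), repC]
  | succ n ih =>
    intro t ht
    by_cases hp : ('h' :: (xtl ++ Y)).isPrefixOf t
    · obtain ⟨t₂, rfl⟩ := tok_decomp xtl Y t hp
      rw [repC_pat]
      have hlen : t₂.length ≤ n := by
        simp at ht
        have hYlen : 1 ≤ Y.length := by rcases hY with h | h <;> simp [h, tokA, tokB]
        omega
      have hstep : ∀ w, scan (Y ++ w)
          = if tokB.isPrefixOf w || tokA.isPrefixOf w then scan w else Y ++ scan w := by
        intro w; rcases hY with h | h <;> rw [h] <;> [exact scan_tokA w; exact scan_tokB w]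
      have hRo : scan (('h' :: xtl) ++ Y ++ t₂) = scan (Y ++ t₂) := by
        rw [List.append_assoc]
        have hcond : (tokB.isPrefixOf (Y ++ t₂) || tokA.isPrefixOf (Y ++ t₂)) = true := by
          rcases hY with h | h <;> rw [h]
          · exact isTok_append_tokA t₂
          · exact isTok_append_tokB t₂
        rcases hXtok with h | h
        · rw [h, scan_tokA, hcond]; simp
        · rw [h, scan_tokB, hcond]; simp
      rw [hstep (repC (xtl ++ Y) Y t₂), isTok_repC xtl Y hXtok hY t₂, ih t₂ hlen,
        hRo, hstep t₂]
    · match t with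
      | [] => rw [repC]
      | c :: t' =>
        have hrep : repC (xtl ++ Y) Y (c :: t') = c :: repC (xtl ++ Y) Y t' := by
          rw [repC, if_neg hp]
        by_cases hB : tokB.isPrefixOf (c :: t')
        · obtain ⟨t₁, he⟩ := List.isPrefixOf_iff_prefix.mp hB
          have he' : c :: t' = 'h' :: (['t','t','p','s',':','/','/'] ++ t₁) := by
            rw [← he]; rfl
          have hrep2 : repC (xtl ++ Y) Y (c :: t') = tokB ++ repC (xtl ++ Y) Y t₁ := by
            rw [he', repC, if_neg (he' ▸ hp), repC_copy _ _ _ _ nonh_tailB]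
            rfl
          have hlen1 : t₁.length ≤ n := by
            have := congrArg List.length he
            simp [tokB] at this ht
            omega
          rw [hrep2, ← he, scan_tokB, scan_tokB,
            isTok_repC xtl Y hXtok hY t₁, ih t₁ hlen1]
        · by_cases hA : tokA.isPrefixOf (c :: t')
          · obtain ⟨t₁, he⟩ := List.isPrefixOf_iff_prefix.mp hA
            have he' : c :: t' = 'h' :: (['t','t','p',':','/','/'] ++ t₁) := by
              rw [← he]; rfl
            have hrep2 : repC (xtl ++ Y) Y (c :: t') = tokA ++ repC (xtl ++ Y) Y t₁ := by
              rw [he', repC, if_neg (he' ▸ hp), repC_copy _ _ _ _ nonh_tailA]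
              rfl
            have hlen1 : t₁.length ≤ n := by
              have := congrArg List.length he
              simp [tokA] at this ht
              omega
            rw [hrep2, ← he, scan_tokA, scan_tokA,
              isTok_repC xtl Y hXtok hY t₁, ih t₁ hlen1]
          · have hor := isTok_repC xtl Y hXtok hY (c :: t')
            rw [Bool.eq_false_iff.mpr hB, Bool.eq_false_iff.mpr hA] at hor
            simp only [Bool.or_false, Bool.or_eq_false_iff] at hor
            rw [hrep] at hor
            rw [hrep, scan_cons c _ hor.1 hor.2,
              scan_cons c t' (Bool.eq_false_iff.mpr hB) (Bool.eq_false_iff.mpr hA),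
              ih t' (by simp at ht; omega)]

theorem scan_stepA (s : List Char) : scan (stepA s) = scan s := by
  rw [stepA_eq_repC]
  rw [show (['t','t','p','s',':','/','/','h','t','t','p','s',':','/','/'] : List Char)
      = ['t','t','p','s',':','/','/'] ++ tokB from rfl,
    show (['t','t','p',':','/','/','h','t','t','p','s',':','/','/'] : List Char)
      = ['t','t','p',':','/','/'] ++ tokB from rfl,
    show (['t','t','p','s',':','/','/','h','t','t','p',':','/','/'] : List Char)
      = ['t','t','p','s',':','/','/'] ++ tokA from rfl,
    show (['t','t','p',':','/','/','h','t','t','p',':','/','/'] : List Char)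
      = ['t','t','p',':','/','/'] ++ tokA from rfl]
  rw [scan_repC _ _ (Or.inl rfl) (Or.inl rfl) _ _ le_rfl,
    scan_repC _ _ (Or.inr rfl) (Or.inl rfl) _ _ le_rfl,
    scan_repC _ _ (Or.inl rfl) (Or.inr rfl) _ _ le_rfl,
    scan_repC _ _ (Or.inr rfl) (Or.inr rfl) _ _ le_rfl]

-- a fixpoint of one loop iteration is a fixpoint of each of the four replacements
theorem stepA_fix_each (s : List Char) (h : stepA s = s) :
    repC ['t','t','p','s',':','/','/','h','t','t','p','s',':','/','/'] tokB s = s ∧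
    repC ['t','t','p',':','/','/','h','t','t','p','s',':','/','/'] tokB s = s ∧
    repC ['t','t','p','s',':','/','/','h','t','t','p',':','/','/'] tokA s = s ∧
    repC ['t','t','p',':','/','/','h','t','t','p',':','/','/'] tokA s = s := by
  rw [stepA_eq_repC] at h
  set l1 := repC ['t','t','p','s',':','/','/','h','t','t','p','s',':','/','/'] tokB s with hl1
  set l2 := repC ['t','t','p',':','/','/','h','t','t','p','s',':','/','/'] tokB l1 with hl2
  set l3 := repC ['t','t','p','s',':','/','/','h','t','t','p',':','/','/'] tokA l2 with hl3
  set l4 := repC ['t','t','p',':','/','/','h','t','t','p',':','/','/'] tokA l3 with hl4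
  have h1 : l1.length ≤ s.length := repC_length_le _ _ (by simp [tokB]) s
  have h2 : l2.length ≤ l1.length := repC_length_le _ _ (by simp [tokB]) l1
  have h3 : l3.length ≤ l2.length := repC_length_le _ _ (by simp [tokA]) l2
  have h4 : l4.length ≤ l3.length := repC_length_le _ _ (by simp [tokA]) l3
  have hlen : l4.length = s.length := by rw [h]
  have q1 : l1 = s := by
    rw [hl1]; exact repC_eq_of_length _ _ (by simp [tokB]) s (by rw [← hl1]; omega)
  have q2 : l2 = l1 := by
    rw [hl2]; exact repC_eq_of_length _ _ (by simp [tokB]) l1 (by rw [← hl2]; omega)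
  have q3 : l3 = l2 := by
    rw [hl3]; exact repC_eq_of_length _ _ (by simp [tokA]) l2 (by rw [← hl3]; omega)
  have q4 : l4 = l3 := by
    rw [hl4]; exact repC_eq_of_length _ _ (by simp [tokA]) l3 (by rw [← hl4]; omega)
  refine ⟨q1, ?_, ?_, ?_⟩
  · rw [← q1]; exact q2
  · rw [← q1, ← q2]; exact q3
  · rw [← q1, ← q2, ← q3]; exact q4

-- a string with no doubled-scheme occurrence is already scanned
theorem scan_noocc : ∀ (n : Nat) (s : List Char), s.length ≤ n →
    ¬((tokB ++ tokB) <:+: s) → ¬((tokA ++ tokB) <:+: s) →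
    ¬((tokB ++ tokA) <:+: s) → ¬((tokA ++ tokA) <:+: s) → scan s = s := by
  intro n
  induction n with
  | zero =>
    intro s hs _ _ _ _
    rw [List.length_eq_zero_iff.mp (Nat.le_zero.mp hs), scan]
  | succ n ih =>
    intro s hs h1 h2 h3 h4
    by_cases hB : tokB.isPrefixOf s
    · obtain ⟨t₁, he⟩ := List.isPrefixOf_iff_prefix.mp hB
      have hcond : (tokB.isPrefixOf t₁ || tokA.isPrefixOf t₁) = false := by
        rw [Bool.or_eq_false_iff]
        constructor
        · rw [Bool.eq_false_iff]
          intro hw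
          obtain ⟨w, hw⟩ := List.isPrefixOf_iff_prefix.mp hw
          exact h1 (List.IsPrefix.isInfix ⟨w, by rw [← he, ← hw]; simp⟩)
        · rw [Bool.eq_false_iff]
          intro hw
          obtain ⟨w, hw⟩ := List.isPrefixOf_iff_prefix.mp hw
          exact h3 (List.IsPrefix.isInfix ⟨w, by rw [← he, ← hw]; simp⟩)
      have hsuf : ∀ p : List Char, p <:+: t₁ → p <:+: s := fun p hp =>
        hp.trans (List.IsSuffix.isInfix ⟨tokB, he⟩)
      have hlen1 : t₁.length ≤ n := by
        have := congrArg List.length he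
        simp [tokB] at this
        omega
      rw [← he, scan_tokB, hcond]
      simp only [Bool.false_eq_true, if_false]
      rw [ih t₁ hlen1 (fun hi => h1 (hsuf _ hi)) (fun hi => h2 (hsuf _ hi))
        (fun hi => h3 (hsuf _ hi)) (fun hi => h4 (hsuf _ hi))]
    · by_cases hA : tokA.isPrefixOf s
      · obtain ⟨t₁, he⟩ := List.isPrefixOf_iff_prefix.mp hA
        have hcond : (tokB.isPrefixOf t₁ || tokA.isPrefixOf t₁) = false := by
          rw [Bool.or_eq_false_iff]
          constructor
          · rw [Bool.eq_false_iff]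
            intro hw
            obtain ⟨w, hw⟩ := List.isPrefixOf_iff_prefix.mp hw
            exact h2 (List.IsPrefix.isInfix ⟨w, by rw [← he, ← hw]; simp⟩)
          · rw [Bool.eq_false_iff]
            intro hw
            obtain ⟨w, hw⟩ := List.isPrefixOf_iff_prefix.mp hw
            exact h4 (List.IsPrefix.isInfix ⟨w, by rw [← he, ← hw]; simp⟩)
        have hsuf : ∀ p : List Char, p <:+: t₁ → p <:+: s := fun p hp =>
          hp.trans (List.IsSuffix.isInfix ⟨tokA, he⟩)
        have hlen1 : t₁.length ≤ n := by
          have := congrArg List.length he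
          simp [tokA] at this
          omega
        rw [← he, scan_tokA, hcond]
        simp only [Bool.false_eq_true, if_false]
        rw [ih t₁ hlen1 (fun hi => h1 (hsuf _ hi)) (fun hi => h2 (hsuf _ hi))
          (fun hi => h3 (hsuf _ hi)) (fun hi => h4 (hsuf _ hi))]
      · match s with
        | [] => rw [scan]
        | c :: t =>
          have hstep : ∀ p : List Char, ¬(p <:+: c :: t) → ¬(p <:+: t) := fun p hcp hi =>
            hcp (List.infix_cons_iff.mpr (Or.inr hi))
          rw [scan_cons c t (Bool.eq_false_iff.mpr hB) (Bool.eq_false_iff.mpr hA),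
            ih t (by simp at hs; omega) (hstep _ h1) (hstep _ h2) (hstep _ h3) (hstep _ h4)]

theorem fixList_fixpoint : ∀ s : List Char, stepA (fixList s) = fixList s := by
  intro s
  induction s using fixList.induct with
  | case1 s s' hfix => rw [fixList, dif_pos hfix, show stepA s = s from hfix]
  | case2 s s' hfix ih => rw [fixList, dif_neg hfix]; exact ih

theorem scan_fixList : ∀ s : List Char, scan (fixList s) = scan s := by
  intro s
  induction s using fixList.induct with
  | case1 s s' hfix => rw [fixList, dif_pos hfix]
  | case2 s s' hfix ih => rw [fixList, dif_neg hfix]; rw [ih, scan_stepA]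

theorem main_eq (s : List Char) : fixList s = scan s := by
  obtain ⟨q1, q2, q3, q4⟩ := stepA_fix_each _ (fixList_fixpoint s)
  have noc : ∀ (otl new : List Char), new.length < otl.length + 1 →
      repC otl new (fixList s) = fixList s → ¬(('h' :: otl) <:+: fixList s) := by
    intro otl new hn hfix hi
    have := repC_lt_of_infix otl new hn _ hi
    rw [hfix] at this
    omega
  have h3 : scan (fixList s) = fixList s :=
    scan_noocc (fixList s).length _ le_rfl
      (noc _ _ (by simp [tokB]) q1) (noc _ _ (by simp [tokB]) q2)
      (noc _ _ (by simp [tokA]) q3) (noc _ _ (by simp [tokA]) q4)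
  exact h3.symm.trans (scan_fixList s)

-- ===== VERDICT (by name: the statement is the Claim_ definition above) =====
theorem fix_url_spec : Claim_equal_fix_url := by
  intro u _
  unfold Spec_fix_url fix_url fix_url_alt
  rw [main_eq]
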